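-- pv_equiv track=rewrite | github.com/SparkJiao/NTU-CE7455-assignments | post_processors/bleu.py | clean_pred_seq
-- ===== SOURCE A (Python) =====
-- def clean_pred_seq(pred):
--     output = []
--     for word in pred:
--         if word == "SOS":
--             continue
--         if word == "EOS":
--             break
--         output.append(word)
--     return ' '.join(output)
-- ===== SOURCE B (Python) =====
-- def clean_pred_seq(pred):
--     pred = list(pred)
--     if "EOS" in pred:
--         prefix = pred[:pred.index("EOS")]
--     else:
--         prefix = pred
--     return ' '.join(word for word in prefix if word != "SOS")
-- ===== Notes on version B (the rewrite author's own statement) =====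
-- stated objective: alternative
-- what changed: Replaces A's single fused loop (skip SOS, break on EOS, accumulate) by two separate steps: locate the EOS boundary with index/slice, then filter SOS in a distinct pass before joining.
import Mathlib
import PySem

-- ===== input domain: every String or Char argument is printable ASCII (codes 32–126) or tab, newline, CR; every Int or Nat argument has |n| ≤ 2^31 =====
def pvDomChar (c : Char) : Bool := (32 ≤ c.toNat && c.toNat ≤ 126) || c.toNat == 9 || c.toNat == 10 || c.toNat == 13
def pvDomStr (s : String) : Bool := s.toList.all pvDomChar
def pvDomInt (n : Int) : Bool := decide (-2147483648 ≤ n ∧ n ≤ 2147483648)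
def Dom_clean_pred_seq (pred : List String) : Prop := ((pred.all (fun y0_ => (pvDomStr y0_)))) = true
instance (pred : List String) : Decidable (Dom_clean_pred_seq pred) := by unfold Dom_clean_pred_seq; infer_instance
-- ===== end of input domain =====

-- B splits A's fused skip/break/accumulate loop into an EOS-boundary slice followed by a separate SOS filter; alternative decomposition, same cost.

-- ===== PORT A =====
-- A's for-loop with continue/break, as structural recursion over the same state
def cpsLoopA : List String → List String
  | [] => []
  | w :: ws =>
    if w = "SOS" then cpsLoopA ws
    else if w = "EOS" then []
    else w :: cpsLoopA ws

def clean_pred_seq (pred : List String) : String :=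
  PySem.Str.join " " (cpsLoopA pred)

-- ===== PORT B =====
def clean_pred_seq_alt (pred : List String) : String :=
  let prefx : List String :=
    if "EOS" ∈ pred then
      PySem.List.slice pred none (some (((PySem.List.index? pred "EOS").getD 0 : Nat) : Int))
    else pred
  PySem.Str.join " " (prefx.filter (fun w => w ≠ "SOS"))

-- ===== PRECONDITION & SPEC =====
def Spec_clean_pred_seq (pred : List String) (out : String) : Prop := out = clean_pred_seq_alt pred
instance (pred : List String) (out : String) : Decidable (Spec_clean_pred_seq pred out) := by unfold Spec_clean_pred_seq; infer_instance

-- ===== CLAIM (what is proved, stated in full; the proofs are below) =====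
def Claim_equal_clean_pred_seq : Prop := ∀ (pred : List String), Dom_clean_pred_seq pred → Spec_clean_pred_seq pred (clean_pred_seq pred)

-- ===== LEMMAS AND PROOFS =====

lemma cpsLoopA_eq_takeWhile_filter (pred : List String) :
    cpsLoopA pred = (pred.takeWhile (fun w => w ≠ "EOS")).filter (fun w => w ≠ "SOS") := by
  induction pred with
  | nil => rfl
  | cons w ws ih =>
    by_cases hs : w = "SOS"
    · subst hs
      simp [cpsLoopA, List.takeWhile_cons, List.filter_cons, ih]
    · by_cases he : w = "EOS"
      · subst he
        simp [cpsLoopA, List.takeWhile_cons]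
      · simp [cpsLoopA, List.takeWhile_cons, List.filter_cons, hs, he, ih]

lemma takeA (ws : List String) :
    (match PySem.List.index? ws "EOS" with
     | some k => ws.take k
     | none => ws) = ws.takeWhile (fun w => w ≠ "EOS") := by
  induction ws with
  | nil => simp [PySem.List.index?]
  | cons w ws ih =>
    by_cases he : w = "EOS"
    · subst he
      rw [PySem.List.index?_cons_self]
      simp [List.takeWhile_cons]
    · rw [PySem.List.index?_cons_of_ne ws he]
      cases h : PySem.List.index? ws "EOS" with
      | none =>
        rw [h] at ih
        simp [List.takeWhile_cons, he]
        simpa using ih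
      | some k =>
        rw [h] at ih
        simp only [Option.map_some]
        simp [List.takeWhile_cons, he, List.take_succ_cons]
        simpa using ih

lemma prefB_eq_takeWhile (pred : List String) :
    (if "EOS" ∈ pred then
      PySem.List.slice pred none (some (((PySem.List.index? pred "EOS").getD 0 : Nat) : Int))
    else pred) = pred.takeWhile (fun w => w ≠ "EOS") := by
  by_cases hm : "EOS" ∈ pred
  · rw [if_pos hm]
    obtain ⟨k, hk⟩ : ∃ k, PySem.List.index? pred "EOS" = some k := by
      cases h : PySem.List.index? pred "EOS" with
      | none => exact absurd ((PySem.List.index?_eq_none_iff pred "EOS").mp h) (by simpa using hm)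
      | some k => exact ⟨k, rfl⟩
    rw [hk]
    simp only [Option.getD_some]
    rw [PySem.List.slice_to_natCast]
    have h2 := takeA pred
    rw [hk] at h2
    exact h2
  · rw [if_neg hm]
    have h2 := takeA pred
    rw [(PySem.List.index?_eq_none_iff pred "EOS").mpr hm] at h2
    exact h2

-- ===== VERDICT (by name: the statement is the Claim_ definition above) =====
theorem clean_pred_seq_spec : Claim_equal_clean_pred_seq := by
  intro pred _
  unfold Spec_clean_pred_seq clean_pred_seq clean_pred_seq_alt
  rw [prefB_eq_takeWhile, cpsLoopA_eq_takeWhile_filter]
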